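-- pv_equiv track=rewrite | github.com/Pajul7/Wcheck | Misc.py | MAC_to_vendor
-- ===== SOURCE A (Python) =====
-- def MAC_to_vendor(MAC_prefix:str , MAC_DB:dict) :
-- 	if len(MAC_prefix) < 8 :
-- 		return "Unknown"
--
-- 	elif MAC_prefix in MAC_DB :
-- 		return MAC_DB[MAC_prefix]["vendorName"]
-- 	else :
-- 		if MAC_prefix[-2] == ':' :
-- 			return MAC_to_vendor(MAC_prefix[:-2] , MAC_DB)
-- 		else :
-- 			return MAC_to_vendor(MAC_prefix[:-1] , MAC_DB)
-- ===== SOURCE B (Python) =====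
-- def MAC_to_vendor(MAC_prefix: str, MAC_DB: dict):
--     # Phase 1: enumerate all candidate prefixes up front (each trim drops the
--     # trailing ':X' pair remainder: 2 chars if the char before last is ':', else 1).
--     candidates = []
--     p = MAC_prefix
--     while len(p) >= 8:
--         candidates.append(p)
--         p = p[:-2] if p[-2] == ':' else p[:-1]
--     # Phase 2: scan the candidates, longest first.
--     for c in candidates:
--         if c in MAC_DB:
--             return MAC_DB[c]["vendorName"]
--     return "Unknown"
-- ===== Notes on version B (the rewrite author's own statement) =====
-- stated objective: idiomatic
-- what changed: Replaces the interleaved test-and-trim recursion by two iterative phases: a while loop that first enumerates every candidate prefix, then a for loop that scans them for the first dictionary hit.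
-- outside the precondition, e.g. on MAC_to_vendor('ab:cd:ef:99', {'ab:cd:ef:': {}}): A returns 'Unknown', B returns 'Unknown'
import Mathlib
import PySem

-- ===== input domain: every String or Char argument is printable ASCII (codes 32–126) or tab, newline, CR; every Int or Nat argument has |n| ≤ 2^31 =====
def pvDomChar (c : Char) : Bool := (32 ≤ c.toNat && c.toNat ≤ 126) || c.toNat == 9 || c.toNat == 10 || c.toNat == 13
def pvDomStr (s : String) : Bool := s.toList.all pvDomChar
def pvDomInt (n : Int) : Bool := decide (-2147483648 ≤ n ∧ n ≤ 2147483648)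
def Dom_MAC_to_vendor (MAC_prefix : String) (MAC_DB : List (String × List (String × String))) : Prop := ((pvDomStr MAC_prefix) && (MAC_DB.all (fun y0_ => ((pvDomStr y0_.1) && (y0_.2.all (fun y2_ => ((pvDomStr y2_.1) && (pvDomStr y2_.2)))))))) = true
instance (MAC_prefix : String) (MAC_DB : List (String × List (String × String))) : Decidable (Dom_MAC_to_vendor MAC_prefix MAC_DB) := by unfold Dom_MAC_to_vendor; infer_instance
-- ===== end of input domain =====

-- B replaces A's interleaved test-and-trim recursion by two iterative phases
-- (enumerate all candidate prefixes, then scan them for the first hit); return values only.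

-- ===== PORT A =====
-- A's recursion, on the character list of MAC_prefix
def pvGoA (p : List Char) (MAC_DB : List (String × List (String × String))) : String :=
  if _h : p.length < 8 then "Unknown"
  else if PySem.Dict.contains (PySem.Dict.mk MAC_DB) (String.ofList p) then
    -- MAC_DB[p]["vendorName"]; Pre_ guarantees the field, "" stands for the KeyError outside Pre_
    (PySem.Dict.get? (PySem.Dict.mk ((PySem.Dict.get? (PySem.Dict.mk MAC_DB) (String.ofList p)).getD [])) "vendorName").getD ""
  else if PySem.List.pyGet? p (-2) = some ':' then
    pvGoA (PySem.List.slice p none (some (-2))) MAC_DB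
  else
    pvGoA (PySem.List.slice p none (some (-1))) MAC_DB
termination_by p.length
decreasing_by
  · rw [PySem.List.slice_to_neg_ofNat p 2 (by omega)]; simp; omega
  · rw [PySem.List.slice_to_neg_one]; simp; omega

def MAC_to_vendor (MAC_prefix : String) (MAC_DB : List (String × List (String × String))) : String :=
  pvGoA MAC_prefix.toList MAC_DB

-- ===== PORT B =====
-- Phase 1 of B: the list of candidate prefixes (the while loop)
def pvChain (p : List Char) : List (List Char) :=
  if _h : p.length < 8 then []
  else if PySem.List.pyGet? p (-2) = some ':' then
    p :: pvChain (PySem.List.slice p none (some (-2)))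
  else
    p :: pvChain (PySem.List.slice p none (some (-1)))
termination_by p.length
decreasing_by
  · rw [PySem.List.slice_to_neg_ofNat p 2 (by omega)]; simp; omega
  · rw [PySem.List.slice_to_neg_one]; simp; omega

-- Phase 2 of B: the for loop with its early return
def pvScan (MAC_DB : List (String × List (String × String))) : List (List Char) → String
  | [] => "Unknown"
  | c :: rest =>
    if PySem.Dict.contains (PySem.Dict.mk MAC_DB) (String.ofList c) then
      -- MAC_DB[c]["vendorName"]; Pre_ guarantees the field, "" stands for the KeyError outside Pre_
      (PySem.Dict.get? (PySem.Dict.mk ((PySem.Dict.get? (PySem.Dict.mk MAC_DB) (String.ofList c)).getD [])) "vendorName").getD ""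
    else pvScan MAC_DB rest

def MAC_to_vendor_alt (MAC_prefix : String) (MAC_DB : List (String × List (String × String))) : String :=
  pvScan MAC_DB (pvChain MAC_prefix.toList)

-- ===== PRECONDITION & SPEC =====
-- Pre_ excludes inputs where an entry whose key is a length-≥8 prefix of MAC_prefix lacks a
-- "vendorName" field: on the candidates it actually looks up A raises KeyError there (the
-- condition is a closed-form superset of the lookup chain, so it also excludes a few inputs
-- where the faulty entry is never reached and A returns).
def Pre_MAC_to_vendor (MAC_prefix : String) (MAC_DB : List (String × List (String × String))) : Prop :=
  ∀ kd ∈ MAC_DB, kd.1.toList <+: MAC_prefix.toList → 8 ≤ kd.1.toList.length →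
    "vendorName" ∈ kd.2.map Prod.fst
instance (MAC_prefix : String) (MAC_DB : List (String × List (String × String))) : Decidable (Pre_MAC_to_vendor MAC_prefix MAC_DB) := by unfold Pre_MAC_to_vendor; infer_instance

def pvWitness_MAC_to_vendor : String × (List (String × List (String × String))) :=
  ("aa:bb:cc", [("aa:bb:cc", [("vendorName", "Acme")])])

def Spec_MAC_to_vendor (MAC_prefix : String) (MAC_DB : List (String × List (String × String))) (out : String) : Prop := out = MAC_to_vendor_alt MAC_prefix MAC_DB
instance (MAC_prefix : String) (MAC_DB : List (String × List (String × String))) (out : String) : Decidable (Spec_MAC_to_vendor MAC_prefix MAC_DB out) := by unfold Spec_MAC_to_vendor; infer_instance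

-- ===== CLAIM (what is proved, stated in full; the proofs are below) =====
def Claim_equal_MAC_to_vendor : Prop := ∀ (MAC_prefix : String) (MAC_DB : List (String × List (String × String))), Dom_MAC_to_vendor MAC_prefix MAC_DB → Pre_MAC_to_vendor MAC_prefix MAC_DB → Spec_MAC_to_vendor MAC_prefix MAC_DB (MAC_to_vendor MAC_prefix MAC_DB)

-- ===== LEMMAS AND PROOFS =====
-- A's recursion computes exactly B's scan over B's candidate chain
theorem pvGoA_eq_scan_chain (p : List Char) (db : List (String × List (String × String))) :
    pvGoA p db = pvScan db (pvChain p) := by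
  fun_induction pvGoA p db with
  | case1 p h => rw [pvChain]; simp [h, pvScan]
  | case2 p h hc =>
    rw [pvChain]; simp only [h, dite_false]
    split <;> simp [pvScan, hc]
  | case3 p h hc hcol ih =>
    rw [pvChain]; simp [h, hc, hcol, pvScan, ih]
  | case4 p h hc hcol ih =>
    rw [pvChain]; simp [h, hc, hcol, pvScan, ih]

-- ===== VERDICT (by name: the statement is the Claim_ definition above) =====
theorem MAC_to_vendor_spec : Claim_equal_MAC_to_vendor := by
  intro MAC_prefix MAC_DB _hdom _hpre
  unfold Spec_MAC_to_vendor MAC_to_vendor MAC_to_vendor_alt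
  exact pvGoA_eq_scan_chain _ _
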